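-- pv_equiv track=rewrite | github.com/DiamondJdev/landmarkBasedNavigation-2D | math2/simulate.py | simulate_vision_system
-- ===== SOURCE A (Python) =====
-- def simulate_vision_system(grid, drone_pos, vision_range=2):
--     """Simulate the vision system detecting the environment."""
--     x, y = drone_pos
--     visible_map = [['?' for _ in row] for row in grid]  # Start with unknown map
--
--     for i in range(-vision_range, vision_range + 1):
--         for j in range(-vision_range, vision_range + 1):
--             nx, ny = x + i, y + j
--             if 0 <= ny < len(grid) and 0 <= nx < len(grid[0]):
--                 visible_map[ny][nx] = grid[ny][nx]
--
--     return visible_map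
-- ===== SOURCE B (Python) =====
-- def simulate_vision_system(grid, drone_pos, vision_range=2):
--     """Reveal each grid cell iff it lies within the Chebyshev vision window
--     around the drone; everything else stays unknown."""
--     x, y = drone_pos
--     return [[cell if abs(nx - x) <= vision_range and abs(ny - y) <= vision_range else '?'
--              for nx, cell in enumerate(row)]
--             for ny, row in enumerate(grid)]
-- ===== Notes on version B (the rewrite author's own statement) =====
-- stated objective: simpler
-- what changed: B builds the visible map in a single per-cell comprehension over the whole grid, testing each cell's Chebyshev distance to the drone, instead of initialising an all-'?' map and then imperatively overwriting cells in a (2r+1)x(2r+1) offset window; Pre_ excludes the ragged-grid corners where A's len(grid[0]) column bound matters inside the vision window (rows shorter than the first make A raise IndexError there; visible cells of rows longer than the first are left '?' by A, an artefact of its first-row-width bound). …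
-- outside the precondition, e.g. on simulate_vision_system([['a'], ['b', 'c']], (1, 1), 1): A returns [['a'], ['b', '?']], B returns [['a'], ['b', 'c']]
import Mathlib
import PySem

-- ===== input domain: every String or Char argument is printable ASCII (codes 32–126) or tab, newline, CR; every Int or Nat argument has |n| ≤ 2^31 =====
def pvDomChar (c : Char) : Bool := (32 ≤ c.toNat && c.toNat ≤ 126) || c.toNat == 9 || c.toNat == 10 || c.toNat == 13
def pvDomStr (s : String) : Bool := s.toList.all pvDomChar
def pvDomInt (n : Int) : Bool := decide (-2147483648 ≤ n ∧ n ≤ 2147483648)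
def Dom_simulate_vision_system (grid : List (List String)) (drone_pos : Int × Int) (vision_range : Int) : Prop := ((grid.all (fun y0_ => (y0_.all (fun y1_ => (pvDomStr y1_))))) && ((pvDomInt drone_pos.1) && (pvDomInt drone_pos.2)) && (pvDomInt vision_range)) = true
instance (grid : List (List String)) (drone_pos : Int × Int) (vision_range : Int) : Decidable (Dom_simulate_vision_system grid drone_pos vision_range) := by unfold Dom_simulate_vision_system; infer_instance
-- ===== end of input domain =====

-- B reveals the grid in one per-cell Chebyshev-distance pass instead of A's
-- init-all-'?'-then-overwrite-offset-window loop (objective: simpler);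
-- equivalence is proved on rectangular grids (Pre_).

-- ===== PORT A =====
-- A-side helper: the body of A's inner loop — one guarded write visible_map[ny][nx] = grid[ny][nx]
def pvRevealA (grid : List (List String)) (vm : List (List String)) (ny nx : Int) :
    List (List String) :=
  if 0 ≤ ny ∧ ny < (grid.length : Int) ∧ 0 ≤ nx ∧ nx < ((grid.headD []).length : Int) then
    PySem.List.pySetD vm ny
      (PySem.List.pySetD (PySem.List.pyGetD vm ny [])
        nx (PySem.List.pyGetD (PySem.List.pyGetD grid ny []) nx "?"))
  else vm

def simulate_vision_system (grid : List (List String)) (drone_pos : Int × Int)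
    (vision_range : Int) : List (List String) :=
  (PySem.List.pyRange (-vision_range) (vision_range + 1) 1).foldl
    (fun vm i => (PySem.List.pyRange (-vision_range) (vision_range + 1) 1).foldl
      (fun vm j => pvRevealA grid vm (drone_pos.2 + j) (drone_pos.1 + i)) vm)
    (grid.map (fun row => row.map (fun _ => "?")))

-- ===== PORT B =====
def simulate_vision_system_alt (grid : List (List String)) (drone_pos : Int × Int)
    (vision_range : Int) : List (List String) :=
  (PySem.List.enumerate grid).map (fun p =>
    (PySem.List.enumerate p.2).map (fun q =>
      if |q.1 - drone_pos.1| ≤ vision_range ∧ |p.1 - drone_pos.2| ≤ vision_range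
      then q.2 else "?"))

-- ===== PRECONDITION & SPEC =====
-- Pre_ excludes exactly the ragged-grid corners where A's len(grid[0]) column bound
-- matters inside the vision window: a visible cell past the end of a row shorter than
-- the first makes A raise IndexError, and a visible cell of a row longer than the first
-- is left '?' by A -- an artefact of its first-row-width bound that no one would specify.
def Pre_simulate_vision_system (grid : List (List String)) (drone_pos : Int × Int)
    (vision_range : Int) : Prop :=
  (∀ a : Nat, a < grid.length → ∀ b : Nat, b < (grid.headD []).length →
      |(b : Int) - drone_pos.1| ≤ vision_range → |(a : Int) - drone_pos.2| ≤ vision_range →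
      b < (grid.getD a []).length) ∧
  (∀ a : Nat, a < grid.length → ∀ b : Nat, b < (grid.getD a []).length →
      (grid.headD []).length ≤ b →
      ¬(|(b : Int) - drone_pos.1| ≤ vision_range ∧ |(a : Int) - drone_pos.2| ≤ vision_range))
instance (grid : List (List String)) (drone_pos : Int × Int) (vision_range : Int) :
    Decidable (Pre_simulate_vision_system grid drone_pos vision_range) := by
  unfold Pre_simulate_vision_system; infer_instance

def pvWitness_simulate_vision_system : List (List String) × (Int × Int) × Int :=
  ([["a", "b"], ["c", "d"]], (0, 0), 1)

def Spec_simulate_vision_system (grid : List (List String)) (drone_pos : Int × Int)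
    (vision_range : Int) (out : List (List String)) : Prop :=
  out = simulate_vision_system_alt grid drone_pos vision_range
instance (grid : List (List String)) (drone_pos : Int × Int) (vision_range : Int)
    (out : List (List String)) : Decidable (Spec_simulate_vision_system grid drone_pos vision_range out) := by
  unfold Spec_simulate_vision_system; infer_instance

-- ===== CLAIM (what is proved, stated in full; the proofs are below) =====
def Claim_equal_simulate_vision_system : Prop := ∀ (grid : List (List String)) (drone_pos : Int × Int) (vision_range : Int), Dom_simulate_vision_system grid drone_pos vision_range → Pre_simulate_vision_system grid drone_pos vision_range → Spec_simulate_vision_system grid drone_pos vision_range (simulate_vision_system grid drone_pos vision_range)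


-- ===== LEMMAS AND PROOFS =====
def pvCell (vm : List (List String)) (a b : Nat) : String := (vm.getD a []).getD b "?"
def pvShape (grid vm : List (List String)) : Prop :=
  vm.length = grid.length ∧ ∀ a : Nat, (vm.getD a []).length = (grid.getD a []).length

theorem pvShape_init (grid : List (List String)) :
    pvShape grid (grid.map (fun row => row.map (fun _ => "?"))) := by
  constructor
  · simp
  · intro a
    simp [List.getD_eq_getElem?_getD, List.getElem?_map]
    cases grid[a]? <;> simp

theorem pvRevealA_shape (grid vm : List (List String)) (ny nx : Int)
    (h : pvShape grid vm) : pvShape grid (pvRevealA grid vm ny nx) := by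
  unfold pvRevealA
  split
  case isTrue hg =>
    obtain ⟨h0, h1, h2, h3⟩ := hg
    rw [PySem.List.pySetD_of_nonneg _ _ h0, PySem.List.pySetD_of_nonneg _ _ h2]
    refine ⟨by simpa using h.1, ?_⟩
    intro a
    rw [List.getD_eq_getElem?_getD, List.getElem?_set]
    split
    case isTrue heq =>
      subst heq
      have hlt : ny.toNat < vm.length := by have := h.1; omega
      simp only [hlt, if_pos]
      simp only [Option.getD_some, List.length_set]
      have : PySem.List.pyGetD vm ny ([] : List String) = vm.getD ny.toNat [] := by
        rw [PySem.List.pyGetD_eq_getElem _ _ h0 (by simpa [h.1] using h1)]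
        simp [List.getD_eq_getElem?_getD, List.getElem?_eq_getElem hlt]
      rw [this]
      exact h.2 ny.toNat
    case isFalse =>
      rw [← List.getD_eq_getElem?_getD]
      exact h.2 a
  case isFalse => exact h

theorem pvRevealA_cell (grid vm : List (List String)) (ny nx : Int)
    (h : pvShape grid vm) (a b : Nat) :
    pvCell (pvRevealA grid vm ny nx) a b =
      if ny = (a : Int) ∧ nx = (b : Int) ∧ (a : Int) < grid.length ∧
          (b : Int) < ((grid.headD []).length : Int) then pvCell grid a b
      else pvCell vm a b := by
  unfold pvRevealA
  split
  case isFalse hg =>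
    rw [if_neg]
    rintro ⟨rfl, rfl, hc, hd⟩
    exact hg ⟨Int.natCast_nonneg a, hc, Int.natCast_nonneg b, hd⟩
  case isTrue hg =>
    obtain ⟨h0, h1, h2, h3⟩ := hg
    lift ny to ℕ using h0 with n
    lift nx to ℕ using h2 with m
    rw [PySem.List.pySetD_of_nonneg _ _ (Int.natCast_nonneg n),
        PySem.List.pySetD_of_nonneg _ _ (Int.natCast_nonneg m)]
    simp only [PySem.List.pyGetD_natCast, Int.toNat_natCast]
    unfold pvCell
    by_cases hna : n = a
    · subst hna
      have hlt : n < vm.length := by have := h.1; omega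
      have h4 : (vm.set n ((vm.getD n []).set m ((grid.getD n []).getD m "?"))).getD n [] =
          (vm.getD n []).set m ((grid.getD n []).getD m "?") := by
        rw [List.getD_eq_getElem?_getD, List.getElem?_set, if_pos rfl, if_pos hlt,
          Option.getD_some]
      rw [h4, List.getD_eq_getElem?_getD, List.getElem?_set]
      by_cases hmb : m = b
      · subst hmb
        rw [if_pos rfl]
        by_cases hblen : m < (vm.getD n []).length
        · rw [if_pos hblen, Option.getD_some,
            if_pos ⟨rfl, rfl, by exact_mod_cast h1, h3⟩]
        · rw [if_neg hblen, Option.getD_none,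
            if_pos ⟨rfl, rfl, by exact_mod_cast h1, h3⟩]
          have := h.2 n
          rw [List.getD_eq_getElem?_getD, List.getElem?_eq_none (by omega), Option.getD_none]
      · rw [if_neg hmb, ← List.getD_eq_getElem?_getD, if_neg]
        rintro ⟨-, hb, -, -⟩
        exact hmb (by exact_mod_cast hb)
    · have h4 : (vm.set n ((vm.getD n []).set m ((grid.getD n []).getD m "?"))).getD a [] =
          vm.getD a [] := by
        rw [List.getD_eq_getElem?_getD, List.getElem?_set, if_neg hna,
          ← List.getD_eq_getElem?_getD]
      rw [h4, if_neg]
      rintro ⟨ha, -, -, -⟩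
      exact hna (by exact_mod_cast ha)

theorem pvFoldJ (grid : List (List String)) (x y i : Int) (L : List Int)
    (vm : List (List String)) (h : pvShape grid vm) :
    pvShape grid (L.foldl (fun vm j => pvRevealA grid vm (y + j) (x + i)) vm) ∧
    ∀ a b : Nat,
      pvCell (L.foldl (fun vm j => pvRevealA grid vm (y + j) (x + i)) vm) a b =
        if ((a : Int) - y) ∈ L ∧ x + i = (b : Int) ∧ (a : Int) < grid.length ∧
            (b : Int) < ((grid.headD []).length : Int) then pvCell grid a b
        else pvCell vm a b := by
  induction L generalizing vm with
  | nil => exact ⟨h, fun a b => by simp⟩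
  | cons j L ih =>
    obtain ⟨ih1, ih2⟩ := ih (pvRevealA grid vm (y + j) (x + i)) (pvRevealA_shape grid vm _ _ h)
    refine ⟨by simpa using ih1, fun a b => ?_⟩
    rw [List.foldl_cons, ih2 a b, pvRevealA_cell grid vm _ _ h a b]
    have he : (y + j = (a : Int)) ↔ ((a : Int) - y = j) := by omega
    simp only [he, List.mem_cons]
    split_ifs <;> tauto

theorem pvFoldI (grid : List (List String)) (x y : Int) (R L : List Int)
    (vm : List (List String)) (h : pvShape grid vm) :
    pvShape grid (L.foldl (fun vm i =>
        R.foldl (fun vm j => pvRevealA grid vm (y + j) (x + i)) vm) vm) ∧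
    ∀ a b : Nat,
      pvCell (L.foldl (fun vm i =>
          R.foldl (fun vm j => pvRevealA grid vm (y + j) (x + i)) vm) vm) a b =
        if ((b : Int) - x) ∈ L ∧ ((a : Int) - y) ∈ R ∧ (a : Int) < grid.length ∧
            (b : Int) < ((grid.headD []).length : Int) then pvCell grid a b
        else pvCell vm a b := by
  induction L generalizing vm with
  | nil => exact ⟨h, fun a b => by simp⟩
  | cons i L ih =>
    obtain ⟨hs, hc⟩ := pvFoldJ grid x y i R vm h
    obtain ⟨ih1, ih2⟩ := ih _ hs
    refine ⟨by simpa using ih1, fun a b => ?_⟩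
    rw [List.foldl_cons, ih2 a b, hc a b]
    have he : (x + i = (b : Int)) ↔ ((b : Int) - x = i) := by omega
    simp only [he, List.mem_cons]
    split_ifs <;> tauto

theorem pvCell_init (grid : List (List String)) (a b : Nat) :
    pvCell (grid.map (fun row => row.map (fun _ => "?"))) a b = "?" := by
  unfold pvCell
  simp only [List.getD_eq_getElem?_getD, List.getElem?_map]
  cases grid[a]? with
  | none => rfl
  | some row =>
    simp only [Option.map_some, Option.getD_some, List.getElem?_map]
    cases row[b]? <;> rfl

theorem pvCell_of_lt (vm : List (List String)) (a b : Nat) (ha : a < vm.length)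
    (hb : b < (vm[a]).length) : pvCell vm a b = vm[a][b] := by
  unfold pvCell
  rw [List.getD_eq_getElem?_getD, List.getD_eq_getElem?_getD,
    List.getElem?_eq_getElem ha, Option.getD_some, List.getElem?_eq_getElem hb,
    Option.getD_some]

theorem main_eq (grid : List (List String)) (drone_pos : Int × Int) (vision_range : Int)
    (hpre : Pre_simulate_vision_system grid drone_pos vision_range) :
    simulate_vision_system grid drone_pos vision_range =
      simulate_vision_system_alt grid drone_pos vision_range := by
  unfold simulate_vision_system simulate_vision_system_alt
  obtain ⟨hs, hc⟩ := pvFoldI grid drone_pos.1 drone_pos.2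
    (PySem.List.pyRange (-vision_range) (vision_range + 1) 1)
    (PySem.List.pyRange (-vision_range) (vision_range + 1) 1)
    (grid.map (fun row => row.map (fun _ => "?"))) (pvShape_init grid)
  apply List.ext_getElem
  · rw [hs.1]; simp [PySem.List.length_enumerate]
  · intro a ha1 ha2
    have hag : a < grid.length := hs.1 ▸ ha1
    have hlen2 : (((PySem.List.pyRange (-vision_range) (vision_range + 1) 1).foldl
        (fun vm i => (PySem.List.pyRange (-vision_range) (vision_range + 1) 1).foldl
          (fun vm j => pvRevealA grid vm (drone_pos.2 + j) (drone_pos.1 + i)) vm)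
        (grid.map (fun row => row.map (fun _ => "?"))))[a]).length = (grid[a]).length := by
      have h2 := hs.2 a
      rw [List.getD_eq_getElem?_getD, List.getD_eq_getElem?_getD,
        List.getElem?_eq_getElem ha1, Option.getD_some,
        List.getElem?_eq_getElem hag, Option.getD_some] at h2
      exact h2
    apply List.ext_getElem
    · rw [hlen2]
      simp only [List.getElem_map, List.length_map, PySem.List.length_enumerate]
      rw [PySem.List.getElem_enumerate]
    · intro b hb1 hb2
      have hbrow : b < (grid[a]).length := hlen2 ▸ hb1
      have hbrowD : b < (grid.getD a []).length := by
        rw [List.getD_eq_getElem?_getD, List.getElem?_eq_getElem hag, Option.getD_some]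
        exact hbrow
      have hbw : |(b : Int) - drone_pos.1| ≤ vision_range →
          |(a : Int) - drone_pos.2| ≤ vision_range →
          (b : Int) < ((grid.headD []).length : Int) := by
        intro h1 h2
        by_contra hno
        exact hpre.2 a hag b hbrowD (by omega) ⟨h1, h2⟩
      rw [← pvCell_of_lt _ a b ha1 hb1, hc a b]
      simp only [List.getElem_map, PySem.List.getElem_enumerate, zero_add]
      rw [pvCell_of_lt grid a b hag hbrow, pvCell_init]
      have hiff : (((b : Int) - drone_pos.1 ∈
            PySem.List.pyRange (-vision_range) (vision_range + 1) 1) ∧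
          ((a : Int) - drone_pos.2 ∈
            PySem.List.pyRange (-vision_range) (vision_range + 1) 1) ∧
          (a : Int) < grid.length ∧ (b : Int) < ((grid.headD []).length : Int)) ↔
          (|(b : Int) - drone_pos.1| ≤ vision_range ∧
            |(a : Int) - drone_pos.2| ≤ vision_range) := by
        simp only [PySem.List.mem_pyRange_one, abs_le]
        constructor
        · rintro ⟨h1, h2, h3, h4⟩
          exact ⟨by omega, by omega⟩
        · rintro ⟨h1, h2⟩
          exact ⟨by omega, by omega, by exact_mod_cast hag, hbw (abs_le.mpr h1) (abs_le.mpr h2)⟩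
      split_ifs with hA hB hB
      · rfl
      · exact absurd (hiff.1 hA) hB
      · exact absurd (hiff.2 hB) hA
      · rfl

-- ===== VERDICT (by name: the statement is the Claim_ definition above) =====
theorem simulate_vision_system_spec : Claim_equal_simulate_vision_system := by
  intro grid drone_pos vision_range _ hpre
  unfold Spec_simulate_vision_system
  exact main_eq grid drone_pos vision_range hpre
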